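-- pv_equiv track=rewrite | github.com/howieraem/LCPrac | 2369.check-if-there-is-a-valid-partition-for-the-array.py | validPartition
-- ===== SOURCE A (Python) =====
-- from typing import List
--
-- def validPartition(nums: List[int]) -> bool:
--     n = len(nums)
--     if n < 2:
--         return False
--     if n == 2:
--         return nums[0] == nums[1]
--
--     # dp[i] means whether it's possible to partition s[:i].
--     # As the max subarr len in conditions is 3, earlier dp states
--     # are not useful at later iterations. Instead of allocating len(s)
--     # size to dp, we can fix dp at size 3 and apply sliding window.
--     # Base cases:
--     # dp[0] = True
--     # dp[1] = False
--     # dp[2] = nums[0] == nums[1]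
--     dp = [True, False, nums[0] == nums[1]]  # equivalent to dp[i - 2], dp[i - 1] and dp[i] if len(dp) = len(s)
--
--     for r in range(2, n):
--         # 2 equal elements, 3 equal elements, or 3 consecutive increasing elements
--         dp_cur = (nums[r] == nums[r - 1] and dp[1]) or \
--                  (nums[r] == nums[r - 1] == nums[r - 2] and dp[0]) or \
--                  (nums[r] - nums[r - 1] == 1 and nums[r - 1] - nums[r - 2] == 1 and dp[0])
--
--         # sliding window, rolling update of dp states
--         dp[0] = dp[1]
--         dp[1] = dp[2]
--         dp[2] = dp_cur
--
--         # possible early stop for very long string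
--         if not any(dp):
--             return False
--
--     return dp[2]
-- ===== SOURCE B (Python) =====
-- from typing import List
--
-- def validPartition(nums: List[int]) -> bool:
--     # Run-length compress, then DP over the runs: a run of equal values splits
--     # into pair/triple blocks, while an increasing triple [x, x+1, x+2] must use
--     # the last element of one run, a whole middle run of length exactly 1, and
--     # the first element of the run after it.
--     runs = []
--     for x in nums:
--         if runs and runs[-1][0] == x:
--             runs[-1] = (x, runs[-1][1] + 1)
--         else:
--             runs.append((x, 1))
--
--     def fits(c):  # a run of c equal values splits into blocks of 2 and 3
--         return c == 0 or c >= 2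
--
--     # Walk the runs from the right. a0/a1: the runs after the current one are
--     # partitionable with 0/1 leading elements already consumed by an increasing
--     # triple; b1: same for the runs after the next one, 1 consumed.
--     a0, a1, b1 = True, False, False
--     nxt1 = nxt2 = None  # the next run, and the one after it
--     for v, L in reversed(runs):
--         stair = nxt1 == (v + 1, 1) and nxt2 is not None and nxt2[0] == v + 2
--         c0 = (fits(L) and a0) or (stair and fits(L - 1) and b1)
--         c1 = (fits(L - 1) and a0) or (stair and fits(L - 2) and b1)
--         a0, a1, b1 = c0, c1, a1
--         nxt2 = nxt1
--         nxt1 = (v, L)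
--     return bool(runs) and a0
-- ===== Notes on version B (the rewrite author's own statement) =====
-- stated objective: alternative
-- what changed: B first run-length compresses the array into (value,count) runs and then runs a two-state DP over the runs (state = how many leading elements of a run were consumed by an increasing triple), deciding equal-blocks by a count fit c==0 or c>=2 and increasing triples by a run-shape test (v+1,1),(v+2,...), instead of A's element-by-element rolling-window DP.
import Mathlib
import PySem

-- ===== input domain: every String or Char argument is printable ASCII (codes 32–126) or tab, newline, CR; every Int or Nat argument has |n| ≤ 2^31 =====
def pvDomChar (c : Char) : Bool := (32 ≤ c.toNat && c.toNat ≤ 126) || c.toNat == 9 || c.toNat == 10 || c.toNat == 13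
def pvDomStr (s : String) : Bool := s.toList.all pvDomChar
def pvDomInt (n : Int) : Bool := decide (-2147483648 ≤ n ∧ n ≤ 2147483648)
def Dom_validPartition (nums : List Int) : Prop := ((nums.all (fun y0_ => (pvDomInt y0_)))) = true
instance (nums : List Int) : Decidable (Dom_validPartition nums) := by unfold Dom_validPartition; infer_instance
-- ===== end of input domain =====

-- B replaces A's element-by-element rolling-window DP by run-length compression followed by a
-- two-state DP over the runs; same O(n) cost, a different algorithm over different data.

-- ===== PORT A =====
-- nums[i] for an index the loop keeps in range (A only reads in-range indices)
def pvIdx (nums : List Int) (i : Int) : Int := (PySem.List.pyGet? nums i).getD 0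

def aStep (nums : List Int) (st : Option (Bool × Bool × Bool)) (r : Int) :
    Option (Bool × Bool × Bool) :=
  match st with
  | none => none   -- the loop body already executed 'return False'
  | some (d0, d1, d2) =>
    let cur := ((pvIdx nums r == pvIdx nums (r-1)) && d1)
            || (((pvIdx nums r == pvIdx nums (r-1)) && (pvIdx nums (r-1) == pvIdx nums (r-2))) && d0)
            || (((pvIdx nums r - pvIdx nums (r-1) == 1) && (pvIdx nums (r-1) - pvIdx nums (r-2) == 1)) && d0)
    -- dp[0] = dp[1]; dp[1] = dp[2]; dp[2] = dp_cur; if not any(dp): return False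
    if !(d1 || d2 || cur) then none else some (d1, d2, cur)

def validPartition (nums : List Int) : Bool :=
  let n : Int := nums.length
  if n < 2 then false
  else if n == 2 then pvIdx nums 0 == pvIdx nums 1
  else
    match (PySem.List.pyRange 2 n 1).foldl (aStep nums)
        (some (true, false, pvIdx nums 0 == pvIdx nums 1)) with
    | none => false
    | some (_, _, d2) => d2

-- ===== PORT B =====
-- fits(c): a run of c equal values splits into blocks of 2 and 3
def fitsI (c : Int) : Bool := (c == 0) || decide ((2:Int) ≤ c)

-- the run-building loop body: merge into the last run or append a new run
def runsStep (rs : List (Int × Int)) (x : Int) : List (Int × Int) :=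
  match rs.getLast? with
  | some (v, c) => if v == x then rs.dropLast ++ [(x, c + 1)] else rs ++ [(x, 1)]
  | none => rs ++ [(x, 1)]

-- the backward loop body over runs: state = ((a0, a1, b1), nxt1, nxt2)
def bStep (st : (Bool × Bool × Bool) × Option (Int × Int) × Option (Int × Int))
    (r : Int × Int) : (Bool × Bool × Bool) × Option (Int × Int) × Option (Int × Int) :=
  let a0 := st.1.1
  let a1 := st.1.2.1
  let b1 := st.1.2.2
  let stair := (st.2.1 == some (r.1 + 1, 1)) &&
    (match st.2.2 with | some p => p.1 == r.1 + 2 | none => false)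
  ((fitsI r.2 && a0 || (stair && fitsI (r.2 - 1) && b1),
    fitsI (r.2 - 1) && a0 || (stair && fitsI (r.2 - 2) && b1),
    a1), some r, st.2.1)

def validPartition_alt (nums : List Int) : Bool :=
  let runs := nums.foldl runsStep []
  let st := runs.reverse.foldl bStep ((true, false, false), none, none)
  (!runs.isEmpty) && st.1.1

-- ===== PRECONDITION & SPEC =====
def Spec_validPartition (nums : List Int) (out : Bool) : Prop := out = validPartition_alt nums
instance (nums : List Int) (out : Bool) : Decidable (Spec_validPartition nums out) := by unfold Spec_validPartition; infer_instance

-- ===== CLAIM (what is proved, stated in full; the proofs are below) =====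
def Claim_equal_validPartition : Prop := ∀ (nums : List Int), Dom_validPartition nums → Spec_validPartition nums (validPartition nums)

-- ===== LEMMAS AND PROOFS =====

-- Canonical suffix-recursion: is l partitionable into blocks [x,x], [x,x,x], [x,x+1,x+2]?
def pvOk : List Int → Bool
  | [] => true
  | [_] => false
  | [a, b] => a == b
  | a :: b :: c :: t =>
      ((a == b) && pvOk (c :: t)) ||
      ((((a == b) && (b == c)) || ((b - a == 1) && (c - b == 1))) && pvOk t)

-- Same on REVERSED lists (first elements are the last of the original list).
def pvOkR : List Int → Bool
  | [] => true
  | [_] => false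
  | [a, b] => a == b
  | a :: b :: c :: t =>
      ((a == b) && pvOkR (c :: t)) ||
      ((((a == b) && (b == c)) || ((a - b == 1) && (b - c == 1))) && pvOkR t)

def pvGood (bk : List Int) : Prop :=
  (∃ x, bk = [x, x]) ∨ (∃ x, bk = [x, x, x]) ∨ (∃ x, bk = [x, x+1, x+2])

def pvPart (l : List Int) : Prop :=
  ∃ bs : List (List Int), (∀ b ∈ bs, pvGood b) ∧ bs.flatten = l

lemma pvPart_nil : pvPart [] := ⟨[], by simp, rfl⟩

lemma pvPart_block_append {bk l : List Int} (hg : pvGood bk) (hl : pvPart l) :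
    pvPart (bk ++ l) := by
  obtain ⟨bs, hgood, hflat⟩ := hl
  refine ⟨bk :: bs, ?_, by simp [hflat]⟩
  rintro b hb
  rcases List.mem_cons.1 hb with rfl | hb
  · exact hg
  · exact hgood b hb

lemma pvPart_append_block {l bk : List Int} (hl : pvPart l) (hg : pvGood bk) :
    pvPart (l ++ bk) := by
  obtain ⟨bs, hgood, hflat⟩ := hl
  refine ⟨bs ++ [bk], ?_, by simp [hflat]⟩
  intro b hb
  rcases List.mem_append.1 hb with h | h
  · exact hgood b h
  · simp at h; subst h; exact hg

lemma pvPart_first {m : List Int} (h : pvPart m) (hne : m ≠ []) :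
    ∃ bk l', pvGood bk ∧ m = bk ++ l' ∧ pvPart l' := by
  obtain ⟨bs, hgood, hflat⟩ := h
  cases bs with
  | nil => simp at hflat; exact absurd hflat hne
  | cons b0 rest =>
      exact ⟨b0, rest.flatten, hgood b0 (by simp),
        by simp [← hflat], ⟨rest, fun b hb => hgood b (by simp [hb]), rfl⟩⟩

lemma pvPart_last {m : List Int} (h : pvPart m) (hne : m ≠ []) :
    ∃ l' bk, pvGood bk ∧ m = l' ++ bk ∧ pvPart l' := by
  obtain ⟨bs, hgood, hflat⟩ := h
  rcases List.eq_nil_or_concat bs with rfl | ⟨bs', bk, rfl⟩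
  · simp at hflat; exact absurd hflat hne
  · exact ⟨bs'.flatten, bk, hgood bk (by simp),
      by simp [← hflat], ⟨bs', fun b hb => hgood b (by simp [hb]), rfl⟩⟩

lemma pvOk_iff : ∀ l : List Int, pvOk l = true ↔ pvPart l := by
  intro l
  induction l using pvOk.induct with
  | case1 => simp [pvOk, pvPart_nil]
  | case2 a =>
      simp only [pvOk, Bool.false_eq_true, false_iff]
      intro h
      obtain ⟨bk, l', hg, heq, _⟩ := pvPart_first h (by simp)
      rcases hg with ⟨x, rfl⟩ | ⟨x, rfl⟩ | ⟨x, rfl⟩ <;> simp at heq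
  | case3 a b =>
      constructor
      · intro h
        have : a = b := by simpa [pvOk] using h
        subst this
        exact ⟨[[a, a]], by rintro bk hbk; simp at hbk; subst hbk; exact Or.inl ⟨a, rfl⟩, by simp⟩
      · intro h
        obtain ⟨bk, l', hg, heq, _⟩ := pvPart_first h (by simp)
        rcases hg with ⟨x, rfl⟩ | ⟨x, rfl⟩ | ⟨x, rfl⟩ <;> simp_all [pvOk]
  | case4 a b c t ih1 ih2 =>
      constructor
      · intro h
        simp only [pvOk, Bool.or_eq_true, Bool.and_eq_true, beq_iff_eq] at h
        rcases h with ⟨rfl, h2⟩ | ⟨hc, h3⟩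
        · exact pvPart_block_append (Or.inl ⟨a, rfl⟩) (ih1.1 h2)
        · rcases hc with ⟨rfl, rfl⟩ | ⟨h1, h2⟩
          · exact pvPart_block_append (Or.inr (Or.inl ⟨a, rfl⟩)) (ih2.1 h3)
          · have hb : b = a + 1 := by omega
            have hcc : c = a + 2 := by omega
            subst hb; subst hcc
            exact pvPart_block_append (Or.inr (Or.inr ⟨a, rfl⟩)) (ih2.1 h3)
      · intro h
        obtain ⟨bk, l', hg, heq, hp⟩ := pvPart_first h (by simp)
        simp only [pvOk, Bool.or_eq_true, Bool.and_eq_true, beq_iff_eq]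
        rcases hg with ⟨x, rfl⟩ | ⟨x, rfl⟩ | ⟨x, rfl⟩ <;>
          simp only [List.cons_append, List.nil_append, List.cons.injEq] at heq
        · obtain ⟨rfl, rfl, rfl⟩ := heq
          exact Or.inl ⟨rfl, ih1.2 hp⟩
        · obtain ⟨rfl, rfl, rfl, rfl⟩ := heq
          exact Or.inr ⟨Or.inl ⟨rfl, rfl⟩, ih2.2 hp⟩
        · obtain ⟨rfl, rfl, rfl, rfl⟩ := heq
          exact Or.inr ⟨Or.inr ⟨by omega, by omega⟩, ih2.2 hp⟩

lemma pvOkR_iff : ∀ l : List Int, pvOkR l = true ↔ pvPart l.reverse := by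
  intro l
  induction l using pvOkR.induct with
  | case1 => simp [pvOkR, pvPart_nil]
  | case2 a =>
      simp only [pvOkR, Bool.false_eq_true, false_iff, List.reverse_singleton]
      intro h
      obtain ⟨l', bk, hg, heq, _⟩ := pvPart_last h (by simp)
      rcases hg with ⟨x, rfl⟩ | ⟨x, rfl⟩ | ⟨x, rfl⟩ <;>
        · have := congrArg List.length heq; simp at this
  | case3 a b =>
      show (a == b) = true ↔ pvPart [b, a]
      constructor
      · intro h
        have : a = b := by simpa using h
        subst this
        exact ⟨[[a, a]], by rintro bk hbk; simp at hbk; subst hbk; exact Or.inl ⟨a, rfl⟩, by simp⟩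
      · intro h
        obtain ⟨l', bk, hg, heq, _⟩ := pvPart_last h (by simp)
        rcases hg with ⟨x, rfl⟩ | ⟨x, rfl⟩ | ⟨x, rfl⟩
        · have hl : l' = [] := by
            have := congrArg List.length heq; simp at this
            exact this
          subst hl; simp at heq
          simp [heq]
        · have := congrArg List.length heq; simp at this
        · have := congrArg List.length heq; simp at this
  | case4 a b c t ih1 ih2 =>
      have hrev : (a :: b :: c :: t).reverse = t.reverse ++ [c, b, a] := by simp
      have hrev1 : (c :: t).reverse = t.reverse ++ [c] := by simp
      rw [pvOkR, hrev]
      constructor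
      · intro h
        simp only [Bool.or_eq_true, Bool.and_eq_true, beq_iff_eq] at h
        rcases h with ⟨rfl, h2⟩ | ⟨hc, h3⟩
        · have : t.reverse ++ [c, a, a] = (c :: t).reverse ++ [a, a] := by simp
          rw [this]
          exact pvPart_append_block (ih1.1 h2) (Or.inl ⟨a, rfl⟩)
        · rcases hc with ⟨rfl, rfl⟩ | ⟨h1, h2⟩
          · exact pvPart_append_block (ih2.1 h3) (Or.inr (Or.inl ⟨a, rfl⟩))
          · have hb : b = c + 1 := by omega
            have ha : a = c + 2 := by omega
            subst hb; subst ha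
            exact pvPart_append_block (ih2.1 h3) (Or.inr (Or.inr ⟨c, rfl⟩))
      · intro h
        obtain ⟨l', bk, hg, heq, hp⟩ := pvPart_last h (by simp)
        simp only [Bool.or_eq_true, Bool.and_eq_true, beq_iff_eq]
        rcases hg with ⟨x, rfl⟩ | ⟨x, rfl⟩ | ⟨x, rfl⟩
        · have heq' : (t.reverse ++ [c]) ++ [b, a] = l' ++ [x, x] := by
            rw [← heq]; simp
          obtain ⟨hl, hba⟩ := List.append_inj' heq' (by simp)
          obtain ⟨rfl, rfl⟩ : b = x ∧ a = x := by simpa using hba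
          refine Or.inl ⟨rfl, ih1.2 ?_⟩
          rw [hrev1, hl]; exact hp
        · obtain ⟨hl, hba⟩ := List.append_inj' heq.symm (by simp)
          obtain ⟨rfl, rfl, rfl⟩ : x = c ∧ x = b ∧ x = a := by simpa using hba
          subst hl
          exact Or.inr ⟨Or.inl ⟨rfl, rfl⟩, ih2.2 hp⟩
        · obtain ⟨hl, hba⟩ := List.append_inj' heq.symm (by simp)
          obtain ⟨hc1, hb1, ha1⟩ : x = c ∧ x + 1 = b ∧ x + 2 = a := by simpa using hba
          subst hl; subst hc1; rw [← hb1, ← ha1]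
          exact Or.inr ⟨Or.inr ⟨by omega, by omega⟩, ih2.2 hp⟩

lemma pvOkR_reverse (l : List Int) : pvOkR l.reverse = pvOk l := by
  rw [Bool.eq_iff_iff, pvOkR_iff, pvOk_iff, List.reverse_reverse]

-- ---- A side ----
def pvR (nums : List Int) (j : ℕ) : Bool := pvOkR ((nums.take j).reverse)

lemma take_rev_succ (nums : List Int) (j : ℕ) (h : j < nums.length) :
    (nums.take (j+1)).reverse = nums[j] :: (nums.take j).reverse := by
  rw [List.take_add_one, List.getElem?_eq_getElem h]; simp

lemma pvIdx_eq (nums : List Int) (j : ℕ) (h : j < nums.length) :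
    pvIdx nums (j : Int) = nums[j] := by
  rw [pvIdx, PySem.List.pyGet?_natCast, List.getElem?_eq_getElem h]; rfl

lemma pvR_step (nums : List Int) (r : ℕ) (h2 : 2 ≤ r) (hr : r < nums.length) :
    pvR nums (r+1) =
      (((nums[r]'hr == nums[r-1]'(by omega)) && pvR nums (r-1)) ||
      ((((nums[r]'hr == nums[r-1]'(by omega)) && (nums[r-1]'(by omega) == nums[r-2]'(by omega))) ||
        ((nums[r]'hr - nums[r-1]'(by omega) == 1) && (nums[r-1]'(by omega) - nums[r-2]'(by omega) == 1)))
        && pvR nums (r-2))) := by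
  have e1 : r - 1 + 1 = r := by omega
  have e2 : r - 2 + 1 = r - 1 := by omega
  have t1 : (nums.take r).reverse = nums[r-1] :: (nums.take (r-1)).reverse := by
    conv_lhs => rw [← e1]
    exact take_rev_succ nums (r-1) (by omega)
  have t2 : (nums.take (r-1)).reverse = nums[r-2] :: (nums.take (r-2)).reverse := by
    conv_lhs => rw [← e2]
    exact take_rev_succ nums (r-2) (by omega)
  simp only [pvR]
  rw [take_rev_succ nums r hr, t1, t2, pvOkR, ← t2]

-- A's three-way or distributes into the okR shape
lemma bool5 (p q r d0 d1 : Bool) :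
    ((p && d1) || (q && d0) || (r && d0)) = ((p && d1) || ((q || r) && d0)) := by
  cases p <;> cases q <;> cases r <;> cases d0 <;> cases d1 <;> rfl

def pvInv (nums : List Int) (st : Option (Bool × Bool × Bool)) (r : ℕ) : Prop :=
  st = some (pvR nums (r-2), pvR nums (r-1), pvR nums r) ∨
  (st = none ∧ pvR nums (r-2) = false ∧ pvR nums (r-1) = false ∧ pvR nums r = false)

lemma aStep_inv (nums : List Int) (st : Option (Bool × Bool × Bool)) (k : ℕ)
    (h2 : 2 ≤ k) (hk : k < nums.length) (h : pvInv nums st k) :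
    pvInv nums (aStep nums st (k : Int)) (k+1) := by
  have hk1 : k - 1 < nums.length := by omega
  have hk2 : k - 2 < nums.length := by omega
  have i0 : pvIdx nums (k : Int) = nums[k] := pvIdx_eq nums k hk
  have e1 : (k : Int) - 1 = ((k-1 : ℕ) : Int) := by omega
  have e2 : (k : Int) - 2 = ((k-2 : ℕ) : Int) := by omega
  have i1 : pvIdx nums ((k : Int) - 1) = nums[k-1] := by rw [e1]; exact pvIdx_eq nums (k-1) hk1
  have i2 : pvIdx nums ((k : Int) - 2) = nums[k-2] := by rw [e2]; exact pvIdx_eq nums (k-2) hk2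
  have n1 : k + 1 - 2 = k - 1 := by omega
  have n2 : k + 1 - 1 = k := by omega
  have hcur : (((nums[k] == nums[k-1]'hk1) && pvR nums (k-1)) ||
      (((nums[k] == nums[k-1]'hk1) && (nums[k-1]'hk1 == nums[k-2]'hk2)) && pvR nums (k-2)) ||
      (((nums[k] - nums[k-1]'hk1 == 1) && (nums[k-1]'hk1 - nums[k-2]'hk2 == 1)) && pvR nums (k-2))) =
      pvR nums (k+1) := by
    rw [pvR_step nums k h2 hk, bool5]
  rcases h with rfl | ⟨rfl, ha, hb, hc⟩
  · show pvInv nums (if _ then none else some _) (k+1)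
    rw [pvInv, n1, n2]
    simp only [i0, i1, i2]
    split_ifs with hif
    · simp only [Bool.not_or, Bool.and_eq_true, Bool.not_eq_true'] at hif
      right
      refine ⟨rfl, hif.1.1, hif.1.2, ?_⟩
      rw [← hcur]
      simp only [hif.2.1.1, hif.2.1.2, hif.2.2, Bool.or_false]
    · left
      rw [← hcur]
  · exact Or.inr ⟨rfl, by rw [n1]; exact hb, by rw [n2]; exact hc, by
      rw [pvR_step nums k h2 hk, hb]
      have hb2 : pvR nums (k-2) = false := ha
      rw [hb2]
      simp⟩

lemma fold_inv (nums : List Int) (k : ℕ) (h2 : 2 ≤ k) (hk : k ≤ nums.length) :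
    pvInv nums ((PySem.List.pyRange 2 (k : Int) 1).foldl (aStep nums)
      (some (true, false, pvIdx nums 0 == pvIdx nums 1))) k := by
  induction k, h2 using Nat.le_induction with
  | base =>
      rw [show ((2:ℕ) : Int) = 2 by rfl, PySem.List.pyRange_one_eq_nil (by omega)]
      left
      simp only [List.foldl_nil]
      have r0 : pvR nums 0 = true := by rw [pvR]; rfl
      have r1 : pvR nums 1 = false := by
        rw [pvR, take_rev_succ nums 0 (by omega)]
        rfl
      have r2 : pvR nums 2 = (pvIdx nums 0 == pvIdx nums 1) := by
        rw [pvR, take_rev_succ nums 1 (by omega), take_rev_succ nums 0 (by omega)]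
        have i0 : pvIdx nums (0 : Int) = nums[0]'(by omega) := by
          rw [pvIdx, PySem.List.pyGet?_zero, List.getElem?_eq_getElem (by omega)]
          rfl
        have i1 : pvIdx nums (1 : Int) = nums[1]'(by omega) := by
          rw [pvIdx, show (1:Int) = ((1:ℕ):Int) from rfl, PySem.List.pyGet?_natCast,
            List.getElem?_eq_getElem (by omega)]
          rfl
        rw [i0, i1]
        show (nums[1] == nums[0]) = (nums[0] == nums[1])
        rw [Bool.eq_iff_iff, beq_iff_eq, beq_iff_eq]
        exact eq_comm
      rw [r0, r1, r2]
  | succ k h2k ih =>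
      have hk' : k ≤ nums.length := by omega
      have hcast : ((k + 1 : ℕ) : Int) = (k : Int) + 1 := by omega
      rw [hcast, PySem.List.pyRange_one_succ_right (by omega), List.foldl_append,
        List.foldl_cons, List.foldl_nil]
      exact aStep_inv nums _ k h2k (by omega) (ih hk')

lemma a_eq_pvOk (nums : List Int) (h : nums ≠ []) : validPartition nums = pvOk nums := by
  match nums with
  | [a] => rfl
  | [a, b] => rfl
  | a :: b :: c :: t =>
      have h3 : 3 ≤ (a :: b :: c :: t).length := by simp
      have hfin : pvR (a :: b :: c :: t) (a :: b :: c :: t).length = pvOk (a :: b :: c :: t) := by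
        rw [pvR, List.take_length, pvOkR_reverse]
      have hinv := fold_inv (a :: b :: c :: t) (a :: b :: c :: t).length (by omega) le_rfl
      simp only [validPartition]
      rw [if_neg (by omega), if_neg (by simp; omega)]
      rcases hinv with heq | ⟨heq, _, _, hR⟩ <;> rw [heq]
      · exact hfin
      · rw [← hfin, hR]

-- ---- B side ----
-- the flattening of a run list back to the array it encodes
def decodeRuns (rs : List (Int × Int)) : List Int :=
  rs.flatMap (fun p => List.replicate p.2.toNat p.1)

-- adjacent values all distinct
def DistinctAdj : List Int → Prop
  | [] => True
  | [_] => True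
  | a :: b :: t => a ≠ b ∧ DistinctAdj (b :: t)

-- a well-formed run-length encoding: positive counts, adjacent run values distinct
def GoodRuns (rs : List (Int × Int)) : Prop :=
  (∀ p ∈ rs, 1 ≤ p.2) ∧ DistinctAdj (rs.map Prod.fst)

def stairB (v : Int) (n1 n2 : Option (Int × Int)) : Bool :=
  (n1 == some (v + 1, 1)) && (match n2 with | some p => p.1 == v + 2 | none => false)

-- the DP value B computes: G rs f = "decodeRuns rs minus f leading elements is partitionable"
def G : List (Int × Int) → Int → Bool
  | [], f => f == 0
  | (v, L) :: rest, f =>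
      (fitsI (L - f) && G rest 0) ||
      (stairB v rest.head? rest.tail.head? && fitsI (L - f - 1) && G rest.tail 1)
termination_by rs _ => rs.length
decreasing_by
  all_goals simp [List.length_tail]
  all_goals omega

lemma fitsI_true {x : Int} (h : x = 0 ∨ 2 ≤ x) : fitsI x = true := by
  rcases h with rfl | h <;> simp [fitsI] <;> omega

lemma fitsI_false {x : Int} (h : ¬(x = 0 ∨ 2 ≤ x)) : fitsI x = false := by
  simp [fitsI]; omega

lemma da_tail (l : List Int) (h : DistinctAdj l) : DistinctAdj l.tail := by
  match l, h with
  | [], _ => trivial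
  | [a], _ => trivial
  | a :: b :: t, h => exact h.2

lemma da_snoc (l : List Int) (x : Int) (h : DistinctAdj l)
    (hx : ∀ v, l.getLast? = some v → v ≠ x) : DistinctAdj (l ++ [x]) := by
  induction l with
  | nil => trivial
  | cons a t ih =>
      cases t with
      | nil => exact ⟨hx a rfl, trivial⟩
      | cons b t2 =>
          exact ⟨h.1, ih h.2 (fun v hv => hx v (by rw [List.getLast?_cons_cons]; exact hv))⟩

lemma runsStep_spec (rs : List (Int × Int)) (x : Int) (h : GoodRuns rs) :
    GoodRuns (runsStep rs x) ∧ decodeRuns (runsStep rs x) = decodeRuns rs ++ [x] := by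
  obtain ⟨hcnt, hch⟩ := h
  rcases List.eq_nil_or_concat rs with rfl | ⟨dl, p0, hrs⟩
  · refine ⟨⟨?_, ?_⟩, ?_⟩
    · intro p hp
      simp [runsStep] at hp
      simp [hp]
    · simp [runsStep]
      trivial
    · simp [runsStep, decodeRuns]
  · obtain ⟨v, c⟩ := p0
    rw [List.concat_eq_append] at hrs
    subst hrs
    have hlast : (dl ++ [(v, c)]).getLast? = some (v, c) := by simp
    have hc1 : (1:Int) ≤ c := hcnt (v, c) (by simp)
    by_cases hvx : v = x
    · have hstep : runsStep (dl ++ [(v, c)]) x = dl ++ [(x, c + 1)] := by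
        simp [runsStep, hlast, hvx]
      refine ⟨⟨?_, ?_⟩, ?_⟩
      · intro p hp
        rw [hstep] at hp
        rcases List.mem_append.1 hp with hp | hp
        · exact hcnt p (by simp [hp])
        · simp at hp; subst hp; simp; omega
      · rw [hstep]
        have he : (dl ++ [(x, c + 1)]).map Prod.fst = (dl ++ [(v, c)]).map Prod.fst := by
          simp [hvx]
        rw [he]; exact hch
      · rw [hstep]
        subst hvx
        simp only [decodeRuns, List.flatMap_append, List.flatMap_cons, List.flatMap_nil,
          List.append_nil, List.append_assoc]
        congr 1
        have h1 : (c + 1).toNat = c.toNat + 1 := by omega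
        rw [h1, List.replicate_succ']
    · have hstep : runsStep (dl ++ [(v, c)]) x = (dl ++ [(v, c)]) ++ [(x, 1)] := by
        simp [runsStep, hlast, hvx]
      refine ⟨⟨?_, ?_⟩, ?_⟩
      · intro p hp
        rw [hstep] at hp
        rcases List.mem_append.1 hp with hp | hp
        · exact hcnt p hp
        · simp at hp; subst hp; simp
      · rw [hstep, List.map_append]
        refine da_snoc _ x hch ?_
        intro w hw
        have hgl : ((dl ++ [(v, c)]).map Prod.fst).getLast? = some v := by simp
        rw [hgl] at hw; simp at hw; subst hw
        exact hvx
      · rw [hstep]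
        simp [decodeRuns]

lemma runs_fold (l : List Int) : ∀ rs, GoodRuns rs →
    GoodRuns (l.foldl runsStep rs) ∧ decodeRuns (l.foldl runsStep rs) = decodeRuns rs ++ l := by
  induction l with
  | nil =>
      intro rs h
      constructor
      · simpa using h
      · simp
  | cons x t ih =>
      intro rs h
      obtain ⟨h1, h2⟩ := runsStep_spec rs x h
      obtain ⟨h3, h4⟩ := ih (runsStep rs x) h1
      exact ⟨h3, by rw [List.foldl_cons] at *; rw [h4, h2, List.append_assoc]; rfl⟩

-- the backward fold computes exactly the DP values G
lemma foldB (rs : List (Int × Int)) :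
    rs.reverse.foldl bStep ((true, false, false), none, none) =
      ((G rs 0, G rs 1, G rs.tail 1), rs.head?, rs.tail.head?) := by
  induction rs with
  | nil => simp [G]
  | cons r rs ih =>
      obtain ⟨v, L⟩ := r
      rw [List.reverse_cons, List.foldl_append, ih, List.foldl_cons, List.foldl_nil]
      show bStep _ _ = _
      simp only [bStep, G, stairB]
      have h21 : L - 1 - 1 = L - 2 := by ring
      simp [h21]

-- Q-recurrences for pvOk on a run of equal values followed by m
lemma Qrec (v : Int) (m : List Int) (c : ℕ) :
    pvOk (List.replicate (c+3) v ++ m) =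
      (pvOk (List.replicate (c+1) v ++ m) || pvOk (List.replicate c v ++ m)) := by
  have h : List.replicate (c+3) v ++ m = v :: v :: v :: (List.replicate c v ++ m) := by
    simp [List.replicate_succ]
  have h1 : List.replicate (c+1) v ++ m = v :: (List.replicate c v ++ m) := by
    simp [List.replicate_succ]
  rw [h, h1, pvOk]
  simp

lemma Q2 (v : Int) (m : List Int) (h : ∀ w, m.head? = some w → w ≠ v) :
    pvOk (List.replicate 2 v ++ m) = pvOk m := by
  cases m with
  | nil => simp [pvOk]
  | cons w m1 =>
      have hw : w ≠ v := h w rfl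
      show pvOk (v :: v :: w :: m1) = pvOk (w :: m1)
      rw [pvOk]
      have hb : (v == w) = false := by simp [Ne.symm hw]
      simp [hb]

-- the central run lemma: one run of c ≥ 1 equal values prepended to m
lemma L1 (v : Int) (m : List Int) (h : ∀ w, m.head? = some w → w ≠ v) :
    ∀ c : ℕ, 1 ≤ c → pvOk (List.replicate c v ++ m) =
      ((fitsI (c:Int) && pvOk m) || (fitsI ((c:Int) - 1) && pvOk (v :: m))) := by
  intro c
  induction c using Nat.strong_induction_on with
  | _ c IH =>
    intro hc
    match c, hc with
    | 1, _ =>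
        rw [fitsI_false (by omega), fitsI_true (by omega)]
        simp
    | 2, _ =>
        rw [Q2 v m h, fitsI_true (by omega), fitsI_false (by omega)]
        simp
    | 3, _ =>
        rw [show (3:ℕ) = 0 + 3 by rfl, Qrec]
        rw [fitsI_true (by omega), fitsI_true (by omega)]
        simp [Bool.or_comm]
    | 4, _ =>
        rw [show (4:ℕ) = 1 + 3 by rfl, Qrec, Q2 v m h]
        rw [fitsI_true (by omega), fitsI_true (by omega)]
        simp
    | (k+5), _ =>
        rw [show k+5 = (k+2) + 3 by omega, Qrec,
          IH (k+3) (by omega) (by omega), IH (k+2) (by omega) (by omega)]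
        push_cast
        rw [fitsI_true (x := (k:Int)+3) (by omega), fitsI_true (x := (k:Int)+3-1) (by omega),
          fitsI_true (x := (k:Int)+2) (by omega),
          fitsI_true (x := (k:Int)+2+3) (by omega), fitsI_true (x := (k:Int)+2+3-1) (by omega)]
        cases hq : fitsI ((k:Int)+2-1) <;>
          cases pvOk m <;> cases pvOk (v :: m) <;> simp

lemma decode_cons (v1 c1 : Int) (r2 : List (Int × Int)) (h : 1 ≤ c1) :
    decodeRuns ((v1, c1) :: r2) =
      v1 :: (List.replicate (c1.toNat - 1) v1 ++ decodeRuns r2) := by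
  simp only [decodeRuns, List.flatMap_cons]
  have : c1.toNat = (c1.toNat - 1) + 1 := by omega
  rw [this, List.replicate_succ]
  simp

-- main semantic lemma for the runs DP
lemma G_sem : ∀ (n : ℕ) (rs : List (Int × Int)), rs.length ≤ n → GoodRuns rs →
    (G rs 0 = pvOk (decodeRuns rs)) ∧
    (∀ v' L' rest', rs = (v', L') :: rest' →
      G rs 1 = pvOk (List.replicate (L' - 1).toNat v' ++ decodeRuns rest')) := by
  intro n
  induction n with
  | zero =>
      intro rs hlen _
      have : rs = [] := List.length_eq_zero_iff.1 (by omega)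
      subst this
      exact ⟨by simp [G, decodeRuns, pvOk], by intro v L rest h; simp at h⟩
  | succ n IH =>
      intro rs hlen hgood
      cases rs with
      | nil => exact ⟨by simp [G, decodeRuns, pvOk], by intro v L rest h; simp at h⟩
      | cons r rest =>
        obtain ⟨v, L⟩ := r
        obtain ⟨hcnt, hch⟩ := hgood
        have hL : (1:Int) ≤ L := hcnt (v, L) (by simp)
        have hgr : GoodRuns rest := by
          refine ⟨fun p hp => hcnt p (by simp [hp]), ?_⟩
          have := da_tail _ hch
          simpa using this
        have hgrt : GoodRuns rest.tail := by
          refine ⟨fun p hp => hgr.1 p (List.mem_of_mem_tail hp), ?_⟩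
          cases rest with
          | nil => trivial
          | cons q r2 => exact da_tail _ hgr.2
        have hlr : rest.length ≤ n := by simp at hlen; omega
        have hlrt : rest.tail.length ≤ n := by
          rw [List.length_tail]; omega
        have IHr := IH rest hlr hgr
        have IHrt := IH rest.tail hlrt hgrt
        -- head of decodeRuns rest differs from v
        have hhead : ∀ w, (decodeRuns rest).head? = some w → w ≠ v := by
          intro w hw
          cases rest with
          | nil => simp [decodeRuns] at hw
          | cons q r2 =>
              obtain ⟨v1, c1⟩ := q
              have hc1 : (1:Int) ≤ c1 := hgr.1 (v1, c1) (by simp)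
              rw [decode_cons v1 c1 r2 hc1] at hw
              simp at hw
              subst hw
              have hne : v ≠ v1 := by
                have hud : DistinctAdj (v :: v1 :: List.map Prod.fst r2) := by simpa using hch
                exact hud.1
              exact hne.symm
        -- the staircase characterisation
        have Sval : pvOk (v :: decodeRuns rest) =
            (stairB v rest.head? rest.tail.head? && G rest.tail 1) := by
          cases rest with
          | nil => simp [decodeRuns, pvOk, stairB]
          | cons q r2 =>
            obtain ⟨v1, c1⟩ := q
            have hc1 : (1:Int) ≤ c1 := hgr.1 (v1, c1) (by simp)
            have hvv1 : v ≠ v1 := by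
              have hud : DistinctAdj (v :: v1 :: List.map Prod.fst r2) := by simpa using hch
              exact hud.1
            have hbvv1 : (v == v1) = false := by simp [hvv1]
            by_cases hc1one : c1 = 1
            · subst hc1one
              cases r2 with
              | nil =>
                  have hd : decodeRuns [(v1, (1:Int))] = [v1] := by
                    simp [decodeRuns]
                  rw [hd]
                  show (v == v1) = _
                  simp [stairB, hbvv1, hvv1]
              | cons q2 r3 =>
                  obtain ⟨v2, c2⟩ := q2
                  have hc2 : (1:Int) ≤ c2 := hgr.1 (v2, c2) (by simp)
                  have hd : decodeRuns ((v1, (1:Int)) :: (v2, c2) :: r3) =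
                      v1 :: v2 :: (List.replicate (c2.toNat - 1) v2 ++ decodeRuns r3) := by
                    rw [decode_cons v1 1 _ (by omega)]
                    simp [decode_cons v2 c2 r3 hc2]
                  rw [hd, pvOk]
                  have htail : pvOk (List.replicate (c2.toNat - 1) v2 ++ decodeRuns r3) =
                      G ((v2, c2) :: r3) 1 := by
                    have ht := IHrt.2 v2 c2 r3 rfl
                    simp only [List.tail_cons] at ht
                    rw [ht]
                    have he : (c2 - 1).toNat = c2.toNat - 1 := by omega
                    rw [he]
                  have hst : stairB v (some (v1, (1:Int))) (some (v2, c2)) =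
                      ((v1 == v + 1) && (v2 == v + 2)) := by
                    have hm : stairB v (some (v1, (1:Int))) (some (v2, c2)) =
                        ((some (v1, (1:Int)) == some (v + 1, (1:Int))) && (v2 == v + 2)) := rfl
                    have hsome : (some (v1, (1:Int)) == some (v + 1, (1:Int))) = (v1 == v + 1) := by
                      by_cases h1 : v1 = v + 1
                      · subst h1; simp
                      · have ha : (some (v1, (1:Int)) == some (v + 1, (1:Int))) = false := by
                          rw [beq_eq_false_iff_ne]
                          simp [h1]
                        have hb : (v1 == v + 1) = false := by
                          rw [beq_eq_false_iff_ne]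
                          exact h1
                        rw [ha, hb]
                    rw [hm, hsome]
                  have harith : ((v1 - v == 1) && (v2 - v1 == 1))
                      = ((v1 == v + 1) && (v2 == v + 2)) := by
                    rw [Bool.eq_iff_iff]
                    simp only [Bool.and_eq_true, beq_iff_eq]
                    omega
                  simp only [List.head?_cons, List.tail_cons]
                  rw [htail, hst, hbvv1]
                  simp only [Bool.false_and, Bool.false_or]
                  rw [harith]
            · -- c1 ≥ 2: the second element is v1 again, no staircase possible
              have hd : decodeRuns ((v1, c1) :: r2) =
                  v1 :: v1 :: (List.replicate (c1.toNat - 2) v1 ++ decodeRuns r2) := by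
                rw [decode_cons v1 c1 r2 hc1]
                congr 1
                have h2 : c1.toNat - 1 = (c1.toNat - 2) + 1 := by omega
                rw [h2, List.replicate_succ]
                simp
              rw [hd, pvOk]
              have hst : stairB v (some (v1, c1)) r2.head? = false := by
                rw [Bool.eq_iff_iff]
                simp only [stairB, Bool.and_eq_true, beq_iff_eq, Option.some.injEq,
                  Prod.mk.injEq, Bool.false_eq_true, iff_false, not_and]
                rintro ⟨_, h2⟩
                exact absurd h2 hc1one
              simp only [List.head?_cons, List.tail_cons]
              rw [hst, hbvv1]
              simp
        -- assemble the two components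
        constructor
        · show G ((v, L) :: rest) 0 = _
          rw [G]
          have hd : decodeRuns ((v, L) :: rest) =
              List.replicate L.toNat v ++ decodeRuns rest := by
            simp [decodeRuns]
          rw [hd, L1 v (decodeRuns rest) hhead L.toNat (by omega)]
          rw [IHr.1, Sval]
          have hcast : ((L.toNat : ℕ) : Int) = L := by omega
          rw [hcast, sub_zero]
          cases fitsI L <;> cases fitsI (L - 1) <;>
            cases G rest 0 <;> cases stairB v rest.head? rest.tail.head? <;>
            cases G rest.tail 1 <;> simp
        · intro v' L' rest' heq
          cases heq
          rw [G]
          by_cases hL1 : L = 1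
          · subst hL1
            rw [fitsI_true (by omega), fitsI_false (by omega)]
            have h0 : ((1:Int) - 1).toNat = 0 := by omega
            rw [h0]
            simp [IHr.1]
          · have hL2 : (2:Int) ≤ L := by omega
            rw [L1 v (decodeRuns rest) hhead (L - 1).toNat (by omega)]
            rw [IHr.1, Sval]
            have hcast : (((L - 1).toNat : ℕ) : Int) = L - 1 := by omega
            rw [hcast]
            have h21 : L - 1 - 1 = L - 2 := by ring
            rw [h21]
            cases fitsI (L - 1) <;> cases fitsI (L - 2) <;>
              cases G rest 0 <;> cases stairB v rest.head? rest.tail.head? <;>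
              cases G rest.tail 1 <;> simp

lemma alt_eq_pvOk (nums : List Int) (h : nums ≠ []) :
    validPartition_alt nums = pvOk nums := by
  obtain ⟨hgood, hdec⟩ := runs_fold nums [] ⟨by simp, trivial⟩
  rw [show decodeRuns [] = [] from rfl, List.nil_append] at hdec
  have hne : nums.foldl runsStep [] ≠ [] := by
    intro hnil
    rw [hnil] at hdec
    exact h (by simpa [decodeRuns] using hdec.symm)
  have hval : validPartition_alt nums = ((!(nums.foldl runsStep []).isEmpty) &&
      (((nums.foldl runsStep []).reverse.foldl bStep ((true, false, false), none, none)).1.1)) := rfl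
  rw [hval, foldB]
  have hG := (G_sem (nums.foldl runsStep []).length (nums.foldl runsStep []) le_rfl hgood).1
  show ((!(nums.foldl runsStep []).isEmpty) && G (nums.foldl runsStep []) 0) = _
  rw [hG, hdec]
  simp [List.isEmpty_iff, hne]

-- ===== VERDICT (by name: the statement is the Claim_ definition above) =====
theorem validPartition_spec : Claim_equal_validPartition := by
  intro nums _
  unfold Spec_validPartition
  rcases List.eq_nil_or_concat nums with rfl | ⟨_, _, rfl⟩
  · rfl
  · rw [a_eq_pvOk _ (by simp), alt_eq_pvOk _ (by simp)]
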